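-- pv_equiv track=rewrite | github.com/ErinZhang1998/sketch_collection | read_datasets.py | split_into_individual_strokes
-- ===== SOURCE A (Python) =====
-- def split_into_individual_strokes(data):
--     result = [[[],[]]]
--     for data_idx,(x,y,p) in enumerate(data):
--         result[-1][0].append(x)
--         result[-1][1].append(y)
--         if p == 1 and data_idx < len(data)-1:
--             result.append([[],[]])
--     return result
-- ===== SOURCE B (Python) =====
-- def split_into_individual_strokes(data):
--     bounds = [0]
--     for i in range(len(data) - 1):
--         if data[i][2] == 1:
--             bounds.append(i + 1)
--     bounds.append(len(data))
--     strokes = []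
--     for a, b in zip(bounds, bounds[1:]):
--         xs = []
--         ys = []
--         for x, y, p in data[a:b]:
--             xs.append(x)
--             ys.append(y)
--         strokes.append([xs, ys])
--     return strokes
-- ===== Notes on version B (the rewrite author's own statement) =====
-- stated objective: alternative
-- what changed: Instead of growing the last stroke in-place while iterating (appending to result[-1] and opening a new stroke on pen-up), B first scans once to collect boundary indices [0, cut..., len(data)] and then slices the data at each consecutive boundary pair, unpacking each slice into its x- and y-lists.
import Mathlib
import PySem

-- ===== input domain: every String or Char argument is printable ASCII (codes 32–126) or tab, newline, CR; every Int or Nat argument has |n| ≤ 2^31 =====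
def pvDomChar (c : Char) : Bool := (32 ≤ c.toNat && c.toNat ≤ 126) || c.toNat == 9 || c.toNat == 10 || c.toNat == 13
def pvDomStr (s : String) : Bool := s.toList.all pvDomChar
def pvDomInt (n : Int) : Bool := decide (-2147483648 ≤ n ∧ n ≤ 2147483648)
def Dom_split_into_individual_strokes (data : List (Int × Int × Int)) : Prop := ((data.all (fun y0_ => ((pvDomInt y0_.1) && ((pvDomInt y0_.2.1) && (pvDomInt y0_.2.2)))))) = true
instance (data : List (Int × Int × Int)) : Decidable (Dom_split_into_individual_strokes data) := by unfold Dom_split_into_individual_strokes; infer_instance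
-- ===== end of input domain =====

-- B splits by a different decomposition: one scan collects stroke-boundary indices, then each
-- consecutive boundary pair is sliced out of the data (objective: alternative; same O(n) cost).

-- ===== PORT A =====
-- A mutates result[-1] in place; ported as "modify the last element of the list"
def pvModifyLast {α : Type} (f : α → α) : List α → List α
  | [] => []
  | [a] => [f a]
  | a :: b :: rest => a :: pvModifyLast f (b :: rest)

-- one iteration of A's loop body (n = len(data), fixed over the loop); result[-1] is the
-- python 2-list [xs, ys], accessed positionally with getD
def pvStepA (n : Int) (result : List (List (List Int))) (pr : Int × (Int × Int × Int)) :
    List (List (List Int)) :=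
  let result := pvModifyLast
    (fun s => [(s.getD 0 []) ++ [pr.2.1], (s.getD 1 []) ++ [pr.2.2.1]]) result
  if pr.2.2.2 = 1 ∧ pr.1 < n - 1 then result ++ [[[], []]] else result

def split_into_individual_strokes (data : List (Int × Int × Int)) : List (List (List Int)) :=
  (PySem.List.enumerate data 0).foldl (pvStepA (data.length)) [[[], []]]

-- ===== PORT B =====
def split_into_individual_strokes_alt (data : List (Int × Int × Int)) : List (List (List Int)) :=
  let bounds := ((List.range (data.length - 1)).foldl
      (fun acc i => if (data.getD i (0, 0, 0)).2.2 = 1 then acc ++ [i + 1] else acc) [0])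
    ++ [data.length]
  (bounds.zip bounds.tail).foldl
    (fun strokes ab =>
      -- data[a:b]; drop/take is exact here since 0 ≤ a ≤ b ≤ len(data) for consecutive bounds
      let seg := (data.drop ab.1).take (ab.2 - ab.1)
      strokes ++ [[seg.foldl (fun xs t => xs ++ [t.1]) [],
                   seg.foldl (fun ys t => ys ++ [t.2.1]) []]])
    []

-- ===== PRECONDITION & SPEC =====
def Spec_split_into_individual_strokes (data : List (Int × Int × Int)) (out : List (List (List Int))) : Prop := out = split_into_individual_strokes_alt data
instance (data : List (Int × Int × Int)) (out : List (List (List Int))) : Decidable (Spec_split_into_individual_strokes data out) := by unfold Spec_split_into_individual_strokes; infer_instance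

-- ===== CLAIM (what is proved, stated in full; the proofs are below) =====
def Claim_equal_split_into_individual_strokes : Prop := ∀ (data : List (Int × Int × Int)), Dom_split_into_individual_strokes data → Spec_split_into_individual_strokes data (split_into_individual_strokes data)

-- ===== LEMMAS AND PROOFS =====

-- a stroke, as both programs emit it, from a segment of points
def toStroke (seg : List (Int × Int × Int)) : List (List Int) :=
  [seg.map (·.1), seg.map (·.2.1)]

-- canonical recursive segmentation both ports are reduced to
def goSeg : List (Int × Int × Int) → List (Int × Int × Int) → List (List (Int × Int × Int))
  | [], acc => [acc]
  | d :: rest, acc =>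
    if d.2.2 = 1 ∧ rest ≠ [] then (acc ++ [d]) :: goSeg rest [] else goSeg rest (acc ++ [d])

def cutIdx (data : List (Int × Int × Int)) : List Nat :=
  ((List.range (data.length - 1)).filter
    (fun i => decide ((data.getD i (0, 0, 0)).2.2 = 1))).map (· + 1)

def bounds0 (data : List (Int × Int × Int)) : List Nat :=
  0 :: (cutIdx data ++ [data.length])

def segsOf (data : List (Int × Int × Int)) : List (List (Int × Int × Int)) :=
  ((bounds0 data).zip (bounds0 data).tail).map
    (fun ab => (data.drop ab.1).take (ab.2 - ab.1))

def prependFirst (acc : List (Int × Int × Int)) :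
    List (List (Int × Int × Int)) → List (List (Int × Int × Int))
  | [] => [acc]
  | s :: ss => (acc ++ s) :: ss

lemma pvModifyLast_append {α : Type} (f : α → α) (S : List α) (a : α) :
    pvModifyLast f (S ++ [a]) = S ++ [f a] := by
  induction S with
  | nil => simp [pvModifyLast]
  | cons a' S' ih =>
    cases hS : S' ++ [a] with
    | nil => simp at hS
    | cons b t =>
      show pvModifyLast f (a' :: (S' ++ [a])) = a' :: (S' ++ [f a])
      rw [hS, pvModifyLast, ← hS, ih]

lemma foldl_if_append {α β : Type} (p : α → Prop) [DecidablePred p] (f : α → β)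
    (l : List α) (init : List β) :
    l.foldl (fun acc i => if p i then acc ++ [f i] else acc) init
      = init ++ (l.filter (fun i => decide (p i))).map f := by
  induction l generalizing init with
  | nil => simp
  | cons a l ih =>
    simp only [List.foldl_cons, List.filter_cons]
    by_cases h : p a <;> simp [h, ih]

lemma foldl_append_singleton {α β : Type} (f : α → β) (l : List α) (init : List β) :
    l.foldl (fun acc x => acc ++ [f x]) init = init ++ l.map f := by
  induction l generalizing init with
  | nil => simp
  | cons a l ih => simp [ih]

-- ---- A = map toStroke ∘ goSeg ----
lemma A_fold (n : Int) (rest : List (Int × Int × Int)) :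
    ∀ (k : Int) (S : List (List (List Int))) (acc : List (Int × Int × Int)),
      k + rest.length = n →
      (PySem.List.enumerate rest k).foldl (pvStepA n) (S ++ [toStroke acc])
        = S ++ (goSeg rest acc).map toStroke := by
  induction rest with
  | nil => intro k S acc _; simp [goSeg, PySem.List.enumerate, toStroke]
  | cons d t ih =>
    intro k S acc h
    rw [PySem.List.enumerate_cons, List.foldl_cons]
    have hstep : pvStepA n (S ++ [toStroke acc]) (k, d)
        = (if d.2.2 = 1 ∧ k < n - 1 then
             (S ++ [toStroke (acc ++ [d])]) ++ [[[], []]]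
           else S ++ [toStroke (acc ++ [d])]) := by
      simp [pvStepA, pvModifyLast_append, toStroke]
    rw [hstep]
    simp only [List.length_cons] at h
    by_cases ht : t = []
    · subst ht
      have hk : ¬ k < n - 1 := by simp at h; omega
      rw [if_neg (fun hc => hk hc.2)]
      simp [goSeg, PySem.List.enumerate, toStroke]
    · have hk : k < n - 1 := by
        have : 0 < t.length := List.length_pos_iff.mpr ht
        push_cast at h; omega
      by_cases hd : d.2.2 = 1
      · rw [if_pos ⟨hd, hk⟩]
        have hrw : (S ++ [toStroke (acc ++ [d])]) ++ [[[], []]]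
            = (S ++ [toStroke (acc ++ [d])]) ++ [toStroke []] := by simp [toStroke]
        rw [hrw, ih (k + 1) (S ++ [toStroke (acc ++ [d])]) []
              (by push_cast at h ⊢; omega)]
        simp [goSeg, hd, ht]
      · rw [if_neg (fun hc => hd hc.1),
           ih (k + 1) S (acc ++ [d]) (by push_cast at h ⊢; omega)]
        simp [goSeg, hd]

lemma A_eq_goSeg (data : List (Int × Int × Int)) :
    split_into_individual_strokes data = (goSeg data []).map toStroke := by
  have h := A_fold (data.length) data 0 [] [] (by simp)
  simpa [split_into_individual_strokes, toStroke] using h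

-- ---- segsOf recurrences ----
lemma slice_shift (d : Int × Int × Int) (data : List (Int × Int × Int)) (l : List Nat) :
    ((l.map (· + 1)).zip (l.map (· + 1)).tail).map
        (fun ab => ((d :: data).drop ab.1).take (ab.2 - ab.1))
      = (l.zip l.tail).map (fun ab => (data.drop ab.1).take (ab.2 - ab.1)) := by
  rw [show (l.map (· + 1)).tail = l.tail.map (· + 1) by cases l <;> simp]
  rw [List.zip_map, List.map_map]
  apply List.map_congr_left
  intro ab _
  simp [Prod.map, Nat.succ_sub_succ]

lemma cutIdx_cons (d : Int × Int × Int) (rest : List (Int × Int × Int)) (h : rest ≠ []) :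
    cutIdx (d :: rest) = (if d.2.2 = 1 then [1] else []) ++ (cutIdx rest).map (· + 1) := by
  obtain ⟨r, t, rfl⟩ : ∃ r t, rest = r :: t := by
    cases rest with | nil => exact absurd rfl h | cons r t => exact ⟨r, t, rfl⟩
  simp only [cutIdx, List.length_cons, Nat.add_sub_cancel, List.range_succ_eq_map,
    List.filter_cons, List.filter_map, List.map_map]
  by_cases hd : d.2.2 = 1 <;> simp [hd, Function.comp_def, Nat.succ_eq_add_one] <;> rfl

lemma segsOf_nil : segsOf [] = [[]] := by
  simp [segsOf, bounds0, cutIdx]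

lemma segsOf_single (d : Int × Int × Int) : segsOf [d] = [[d]] := by
  simp [segsOf, bounds0, cutIdx]

lemma tb_ne_nil (data : List (Int × Int × Int)) :
    ∃ c t, cutIdx data ++ [data.length] = c :: t := by
  cases hx : cutIdx data ++ [data.length] with
  | nil => simp at hx
  | cons c t => exact ⟨c, t, rfl⟩

lemma segsOf_ne_nil (data : List (Int × Int × Int)) : segsOf data ≠ [] := by
  obtain ⟨c, t, htb⟩ := tb_ne_nil data
  simp [segsOf, bounds0, htb]

lemma segsOf_cons_cut (d : Int × Int × Int) (rest : List (Int × Int × Int))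
    (h : rest ≠ []) (hd : d.2.2 = 1) :
    segsOf (d :: rest) = [d] :: segsOf rest := by
  obtain ⟨c, t, htb⟩ := tb_ne_nil rest
  have hb0 : bounds0 rest = 0 :: c :: t := by rw [bounds0, htb]
  have hb : bounds0 (d :: rest) = 0 :: (0 :: c :: t).map (· + 1) := by
    rw [← hb0]; simp [bounds0, cutIdx_cons d rest h, hd]
  have key := slice_shift d rest (0 :: c :: t)
  rw [segsOf, hb, segsOf, hb0]
  simp only [List.map_cons, List.zip_cons_cons, List.tail_cons] at key ⊢
  refine congrArg₂ List.cons ?_ ?_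
  · simp
  · simpa using key

lemma segsOf_cons_nocut (d : Int × Int × Int) (rest : List (Int × Int × Int))
    (h : rest ≠ []) (hd : ¬ d.2.2 = 1) :
    segsOf (d :: rest) = prependFirst [d] (segsOf rest) := by
  obtain ⟨c, t, htb⟩ := tb_ne_nil rest
  have hb : bounds0 (d :: rest) = 0 :: ((c :: t).map (· + 1)) := by
    simp [bounds0, cutIdx_cons d rest h, hd, ← htb]
  have key := slice_shift d rest (c :: t)
  rw [segsOf, hb]
  rw [segsOf, show bounds0 rest = 0 :: c :: t from by rw [bounds0, htb]]
  simp only [List.map_cons, List.zip_cons_cons, List.tail_cons, List.map_cons,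
    prependFirst] at key ⊢
  refine congrArg₂ List.cons ?_ key
  simp [List.take_succ_cons]

lemma prependFirst_nil {l : List (List (Int × Int × Int))} (h : l ≠ []) :
    prependFirst [] l = l := by
  cases l with
  | nil => exact absurd rfl h
  | cons s ss => simp [prependFirst]

lemma prependFirst_prependFirst (a b : List (Int × Int × Int))
    (l : List (List (Int × Int × Int))) :
    prependFirst a (prependFirst b l) = prependFirst (a ++ b) l := by
  cases l <;> simp [prependFirst]

lemma goSeg_eq (data : List (Int × Int × Int)) :
    ∀ acc, goSeg data acc = prependFirst acc (segsOf data) := by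
  induction data with
  | nil => intro acc; simp [goSeg, segsOf_nil, prependFirst]
  | cons d rest ih =>
    intro acc
    by_cases ht : rest = []
    · subst ht
      simp [goSeg, segsOf_single, prependFirst]
    · by_cases hd : d.2.2 = 1
      · rw [goSeg, if_pos ⟨hd, ht⟩, segsOf_cons_cut d rest ht hd, ih []]
        rw [prependFirst_nil (segsOf_ne_nil rest)]
        simp [prependFirst]
      · rw [goSeg, if_neg (fun hc => hd hc.1), segsOf_cons_nocut d rest ht hd, ih,
          prependFirst_prependFirst]

-- ---- B = map toStroke ∘ segsOf ----
lemma B_eq (data : List (Int × Int × Int)) :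
    split_into_individual_strokes_alt data = (segsOf data).map toStroke := by
  simp only [split_into_individual_strokes_alt]
  rw [foldl_if_append (p := fun i => (data.getD i (0, 0, 0)).2.2 = 1) (f := fun i => i + 1)]
  rw [foldl_append_singleton
    (f := fun ab : Nat × Nat =>
      [((data.drop ab.1).take (ab.2 - ab.1)).foldl (fun xs t => xs ++ [t.1]) [],
       ((data.drop ab.1).take (ab.2 - ab.1)).foldl (fun ys t => ys ++ [t.2.1]) []])]
  simp only [segsOf, bounds0, cutIdx, List.map_map, List.nil_append, List.cons_append]
  apply List.map_congr_left
  intro ab _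
  have e1 := foldl_append_singleton (f := fun t : Int × Int × Int => t.1)
    ((data.drop ab.1).take (ab.2 - ab.1)) []
  have e2 := foldl_append_singleton (f := fun t : Int × Int × Int => t.2.1)
    ((data.drop ab.1).take (ab.2 - ab.1)) []
  simp only [List.nil_append] at e1 e2
  rw [e1, e2]; simp [toStroke]

-- ===== VERDICT (by name: the statement is the Claim_ definition above) =====
theorem split_into_individual_strokes_spec : Claim_equal_split_into_individual_strokes := by
  intro data _
  unfold Spec_split_into_individual_strokes
  rw [A_eq_goSeg, goSeg_eq data [], prependFirst_nil (segsOf_ne_nil data), B_eq]
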